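-- pv_equiv track=rewrite | github.com/hamidurrk/LUT_exercises | data_structures_and_algorithms/week2/changes.py | changes
-- ===== SOURCE A (Python) =====
-- def changes(A):
--     n = len(A)
--     if n <= 1:
--         return 0
--
--     B = A.copy()
--     cnt = 0
--     for i in range(1, n):
--         if B[i] == B[i - 1]:
--             nxt = B[i + 1] if i + 1 < n else None
--             for cand in (0, -1, 1001, 1002):
--                 if cand != B[i - 1] and cand != nxt:
--                     B[i] = cand
--                     break
--             cnt += 1
--     return cnt
-- ===== SOURCE B (Python) =====
-- def changes(A):
--     total = 0
--     run = 1
--     for prev, cur in zip(A, A[1:]):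
--         if cur == prev:
--             run += 1
--         else:
--             total += run // 2
--             run = 1
--     return total + run // 2
-- ===== Notes on version B (the rewrite author's own statement) =====
-- stated objective: simpler
-- what changed: B drops A's array copy, in-place mutation and candidate-selection inner loop, and instead makes one pass over adjacent pairs summing run_length // 2 for each maximal run of equal elements.
import Mathlib
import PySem

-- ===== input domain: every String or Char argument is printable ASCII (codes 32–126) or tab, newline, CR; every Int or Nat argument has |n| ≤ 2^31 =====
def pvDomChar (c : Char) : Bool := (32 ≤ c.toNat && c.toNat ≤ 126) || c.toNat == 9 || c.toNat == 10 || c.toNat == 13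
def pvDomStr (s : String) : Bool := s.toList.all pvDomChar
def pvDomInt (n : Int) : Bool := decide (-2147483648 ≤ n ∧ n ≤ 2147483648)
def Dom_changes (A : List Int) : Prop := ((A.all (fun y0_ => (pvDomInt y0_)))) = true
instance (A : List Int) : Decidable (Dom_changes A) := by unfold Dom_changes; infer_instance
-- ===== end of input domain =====

-- B replaces A's array-copy-and-mutate greedy simulation by a single run-length pass
-- over adjacent pairs (each maximal run of L equal elements needs exactly L // 2
-- replacements): simpler, same O(n) cost.

-- ===== PORT A =====
-- Literal port of A. All indices i, i-1, i+1 accessed are in range (1 ≤ i < n, and i+1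
-- is read only under i+1 < n), so Python never raises; pyGetD .. 0 / pySetD are exact
-- there. The inner candidate loop with break is List.find? (first passing candidate).
def stepA (n : Int) (st : List Int × Int) (i : Int) : List Int × Int :=
  let B := st.1
  let cnt := st.2
  if PySem.List.pyGetD B i 0 = PySem.List.pyGetD B (i - 1) 0 then
    let nxt : Option Int := if i + 1 < n then some (PySem.List.pyGetD B (i + 1) 0) else none
    let B' :=
      match ([0, -1, 1001, 1002] : List Int).find? (fun cand =>
          !(cand == PySem.List.pyGetD B (i - 1) 0) &&
          (match nxt with | none => true | some v => !(cand == v))) with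
      | some cand => PySem.List.pySetD B i cand
      | none => B
    (B', cnt + 1)
  else (B, cnt)

def changes (A : List Int) : Int :=
  let n : Int := (A.length : Int)
  if n ≤ 1 then 0
  else ((PySem.List.pyRange 1 n 1).foldl (stepA n) (A, 0)).2

-- ===== PORT B =====
-- Port of Source B: one pass over adjacent pairs zip(A, A[1:]) keeping (total, run).
def stepB (st : Int × Int) (pc : Int × Int) : Int × Int :=
  if pc.2 = pc.1 then (st.1, st.2 + 1)
  else (st.1 + PySem.Int.floordiv st.2 2, 1)

def changes_alt (A : List Int) : Int :=
  let st := (A.zip (PySem.List.slice A (some 1) none)).foldl stepB (0, 1)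
  st.1 + PySem.Int.floordiv st.2 2

-- ===== PRECONDITION & SPEC =====
def Spec_changes (A : List Int) (out : Int) : Prop := out = changes_alt A
instance (A : List Int) (out : Int) : Decidable (Spec_changes A out) := by unfold Spec_changes; infer_instance

-- ===== CLAIM (what is proved, stated in full; the proofs are below) =====
def Claim_equal_changes : Prop := ∀ (A : List Int), Dom_changes A → Spec_changes A (changes A)

-- ===== LEMMAS AND PROOFS =====

-- Reference count: b = "previous element was replaced by A's greedy pass".
def countAux (b : Bool) (prev : Int) : List Int → Int
  | [] => 0
  | y :: ys => if !b && (y == prev) then 1 + countAux true y ys else countAux false y ys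

theorem countAux_skip (y c z : Int) (zs : List Int) (hc : c ≠ z) :
    countAux false c (z :: zs) = countAux true y (z :: zs) := by
  simp [countAux, Ne.symm hc]

-- a good candidate is always found, and (when present) avoids the next element
theorem find_cand (a : Int) (o : Option Int) :
    ∃ c, (([0, -1, 1001, 1002] : List Int).find? (fun cand =>
        !(cand == a) && (match o with | none => true | some v => !(cand == v)))) = some c
      ∧ (∀ v, o = some v → c ≠ v) := by
  cases o with
  | none =>
    by_cases h0 : (0 : Int) = a
    · have e0 : ((0 : Int) == a) = true := by simp [h0]
      exact ⟨-1, by simp [List.find?, e0, show ((-1 : Int) == a) = false by simp; omega], by simp⟩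
    · have e0 : ((0 : Int) == a) = false := by simp [h0]
      exact ⟨0, by simp [List.find?, e0], by simp⟩
  | some v =>
    by_cases h0 : (0 : Int) = a ∨ (0 : Int) = v
    · have e0 : (!((0 : Int) == a) && !((0 : Int) == v)) = false := by
        rcases h0 with h | h <;> simp [← h]
      by_cases h1 : (-1 : Int) = a ∨ (-1 : Int) = v
      · have e1 : (!((-1 : Int) == a) && !((-1 : Int) == v)) = false := by
          rcases h1 with h | h <;> simp [← h]
        have ha : (1001 : Int) ≠ a ∧ (1001 : Int) ≠ v := by
          rcases h0 with h0 | h0 <;> rcases h1 with h1 | h1 <;> constructor <;> omega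
        have e2 : (!((1001 : Int) == a) && !((1001 : Int) == v)) = true := by
          simp [ha.1, ha.2]
        refine ⟨1001, ?_, by intro w hw; cases hw; exact ha.2⟩
        simp [List.find?, e0, e1, e2]
      · rcases not_or.mp h1 with ⟨ha, hv⟩
        have e1 : (!((-1 : Int) == a) && !((-1 : Int) == v)) = true := by simp [ha, hv]
        refine ⟨-1, ?_, by intro w hw; cases hw; exact hv⟩
        simp [List.find?, e0, e1]
    · rcases not_or.mp h0 with ⟨ha, hv⟩
      have e0 : (!((0 : Int) == a) && !((0 : Int) == v)) = true := by simp [ha, hv]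
      exact ⟨0, by simp [List.find?, e0], by intro w hw; cases hw; exact hv⟩

-- element accesses of the loop's list, stated once
theorem getD_mid (front : List Int) (p : Int) (rest : List Int) (k : Nat) :
    PySem.List.pyGetD (front ++ p :: rest) ((front.length : Int) + (k : Int)) 0
      = (p :: rest).getD k 0 := by
  have h : ((front.length : Int) + (k : Int)) = ((front.length + k : Nat) : Int) := by push_cast; ring
  rw [h, PySem.List.pyGetD_natCast]
  simp [List.getD, List.getElem?_append_right (Nat.le_add_right _ _)]

theorem set_mid (front : List Int) (p y c : Int) (rest : List Int) :
    PySem.List.pySetD (front ++ p :: y :: rest) ((front.length : Int) + 1) c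
      = (front ++ [p]) ++ c :: rest := by
  have h : ((front.length : Int) + 1) = ((front.length + 1 : Nat) : Int) := by push_cast; ring
  rw [h, PySem.List.pySetD_natCast]
  rw [List.set_append_right _ _ (Nat.le_add_right _ _)]
  simp

-- A's loop, generalized: B = front ++ prev :: rest, next index = front.length + 1
theorem loopA (rest : List Int) : ∀ (front : List Int) (prev : Int) (cnt : Int) (n : Int),
    n = (front.length : Int) + 1 + (rest.length : Int) →
    ((PySem.List.pyRange ((front.length : Int) + 1) n 1).foldl (stepA n)
        (front ++ prev :: rest, cnt)).2
    = cnt + countAux false prev rest := by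
  induction rest with
  | nil =>
    intro front prev cnt n hn
    simp only [List.length_nil, Nat.cast_zero, add_zero] at hn
    rw [PySem.List.pyRange_one_eq_nil (by omega)]
    simp [countAux]
  | cons y ys ih =>
    intro front prev cnt n hn
    simp only [List.length_cons] at hn
    push_cast at hn
    have hlt : (front.length : Int) + 1 < n := by omega
    have hL2 : n = (front.length : Int) + 2 + (ys.length : Int) := by omega
    clear hn
    rw [PySem.List.pyRange_one_cons hlt, List.foldl_cons]
    have g1 : PySem.List.pyGetD (front ++ prev :: y :: ys) ((front.length : Int) + 1) 0 = y := by
      simpa using getD_mid front prev (y :: ys) 1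
    have g0 : PySem.List.pyGetD (front ++ prev :: y :: ys) ((front.length : Int) + 1 - 1) 0 = prev := by
      have h := getD_mid front prev (y :: ys) 0
      simpa using h
    by_cases hy : y = prev
    · -- replacement happens
      cases ys with
      | nil =>
        -- i + 1 = n : nxt is none, remaining range empty
        simp only [List.length_nil, Nat.cast_zero, add_zero] at hL2
        obtain ⟨c, hfind, -⟩ := find_cand prev none
        have hnone : (if (front.length : Int) + 1 + 1 < n then
            some (PySem.List.pyGetD (front ++ prev :: y :: []) ((front.length : Int) + 1 + 1) 0)
          else none) = (none : Option Int) := by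
          rw [if_neg (by omega)]
        have hstep : stepA n (front ++ prev :: y :: [], cnt) ((front.length : Int) + 1)
            = (PySem.List.pySetD (front ++ prev :: y :: []) ((front.length : Int) + 1) c, cnt + 1) := by
          simp only [stepA, g1, g0, if_pos hy, hnone]
          rw [hfind]
        rw [hstep, PySem.List.pyRange_one_eq_nil (by omega)]
        simp [countAux, hy]
      | cons z zs =>
        simp only [List.length_cons] at hL2
        push_cast at hL2
        have g2 : PySem.List.pyGetD (front ++ prev :: y :: z :: zs) ((front.length : Int) + 1 + 1) 0 = z := by
          have h := getD_mid front prev (y :: z :: zs) 2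
          push_cast at h
          rw [show (front.length : Int) + 1 + 1 = (front.length : Int) + 2 by ring]
          simpa using h
        have hlt2 : (front.length : Int) + 1 + 1 < n := by omega
        obtain ⟨c, hfind, hne⟩ := find_cand prev (some z)
        have hcz : c ≠ z := hne z rfl
        have hsome : (if (front.length : Int) + 1 + 1 < n then
            some (PySem.List.pyGetD (front ++ prev :: y :: z :: zs) ((front.length : Int) + 1 + 1) 0)
          else none) = some z := by
          rw [if_pos hlt2, g2]
        have hstep : stepA n (front ++ prev :: y :: z :: zs, cnt) ((front.length : Int) + 1)
            = ((front ++ [prev]) ++ c :: z :: zs, cnt + 1) := by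
          simp only [stepA, g1, g0, if_pos hy, hsome]
          rw [hfind]
          show (PySem.List.pySetD (front ++ prev :: y :: z :: zs) ((front.length : Int) + 1) c, cnt + 1) = _
          rw [set_mid]
        rw [hstep]
        have ihh := ih (front ++ [prev]) c (cnt + 1) n
            (by simp only [List.length_append, List.length_cons, List.length_nil]; push_cast; omega)
        have hidx : (((front ++ [prev]).length : Int) + 1) = (front.length : Int) + 1 + 1 := by
          simp only [List.length_append, List.length_cons, List.length_nil]; push_cast; ring
        rw [hidx] at ihh
        rw [ihh, countAux_skip y c z zs hcz]
        simp [countAux, hy]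
        ring
    · -- no replacement
      have hstep : stepA n (front ++ prev :: y :: ys, cnt) ((front.length : Int) + 1)
          = (front ++ prev :: y :: ys, cnt) := by
        simp only [stepA, g1, g0]
        rw [if_neg hy]
      rw [hstep]
      have ihh := ih (front ++ [prev]) y cnt n
          (by simp only [List.length_append, List.length_cons, List.length_nil]; push_cast; omega)
      have hidx : (((front ++ [prev]).length : Int) + 1) = (front.length : Int) + 1 + 1 := by
        simp only [List.length_append, List.length_cons, List.length_nil]; push_cast; ring
      rw [hidx] at ihh
      simp only [List.append_assoc, List.singleton_append] at ihh
      rw [ihh]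
      simp [countAux, hy]

-- B's loop, generalized: run parity tracks A's "replaced" flag
theorem loopB (xs : List Int) : ∀ (prev total run : Int), 1 ≤ run →
    (let st := (((prev :: xs).zip xs).foldl stepB (total, run))
     st.1 + PySem.Int.floordiv st.2 2)
    = total + PySem.Int.floordiv run 2 + countAux (decide (run % 2 = 0)) prev xs := by
  induction xs with
  | nil => intro prev total run _; simp [countAux]
  | cons z zs ih =>
    intro prev total run hrun
    have fd : ∀ a : Int, PySem.Int.floordiv a 2 = a / 2 := fun a =>
      PySem.Int.floordiv_eq_ediv_of_pos (by omega)
    simp only [List.zip_cons_cons, List.foldl_cons]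
    by_cases hz : z = prev
    · have hs : stepB (total, run) (prev, z) = (total, run + 1) := by
        simp [stepB, hz]
      rw [hs]
      have ihh := ih z total (run + 1) (by omega)
      simp only at ihh ⊢
      rw [ihh]
      by_cases hpar : run % 2 = 0
      · have hb0 : (decide (run % 2 = 0)) = true := by simp [hpar]
        have hb1 : (decide ((run + 1) % 2 = 0)) = false := by simp; omega
        simp only [hb0, hb1, countAux, hz, beq_self_eq_true, Bool.not_true, Bool.false_and,
          Bool.and_true, if_false, Bool.not_false]
        rw [fd, fd]
        have h2 : (run + 1) / 2 = run / 2 := by omega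
        rw [h2]
        simp
      · have hb0 : (decide (run % 2 = 0)) = false := by simp [hpar]
        have hb1 : (decide ((run + 1) % 2 = 0)) = true := by simp; omega
        simp only [hb0, hb1, countAux, hz, beq_self_eq_true, Bool.not_true, Bool.not_false,
          Bool.and_true, Bool.true_and, if_true, Bool.and_self]
        rw [fd, fd]
        have h2 : (run + 1) / 2 = run / 2 + 1 := by omega
        rw [h2]
        ring
    · have hs : stepB (total, run) (prev, z) = (total + PySem.Int.floordiv run 2, 1) := by
        simp [stepB, hz]
      rw [hs]
      have ihh := ih z (total + PySem.Int.floordiv run 2) 1 (by omega)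
      simp only at ihh ⊢
      rw [ihh]
      have hb : (z == prev) = false := by simp [hz]
      have h1 : (decide ((1 : Int) % 2 = 0)) = false := by decide
      simp only [h1, countAux, hb, Bool.and_false, Bool.false_and, if_false, Bool.not_false,
        Bool.true_and, Bool.not_true]
      rw [show PySem.Int.floordiv 1 2 = 0 by decide]
      simp

theorem changes_alt_eq (A : List Int) :
    changes_alt A = match A with
      | [] => 0
      | x :: xs => countAux false x xs := by
  cases A with
  | nil => simp [changes_alt, PySem.Int.floordiv]
  | cons x xs =>
    have h := loopB xs x 0 1 (by omega)
    simp only [changes_alt, PySem.List.slice_from_one, List.tail_cons]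
    simp only at h
    rw [h]
    norm_num [show PySem.Int.floordiv 1 2 = 0 by decide]

-- ===== VERDICT (by name: the statement is the Claim_ definition above) =====
theorem changes_spec : Claim_equal_changes := by
  intro A _
  unfold Spec_changes
  rw [changes_alt_eq]
  cases A with
  | nil => simp [changes]
  | cons x xs =>
    cases xs with
    | nil => simp [changes, countAux]
    | cons y ys =>
      simp only [changes]
      rw [if_neg (by simp)]
      have h := loopA (y :: ys) [] x 0 ((x :: y :: ys).length : Int) (by simp; push_cast; ring)
      simpa using h
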